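-- pv_equiv track=rewrite | github.com/jjpterdh/algorithm | ll/tangerine.py | solution
-- ===== SOURCE A (Python) =====
-- from queue import PriorityQueue
--
-- def solution(k, tangerine):
--     heap=PriorityQueue()
--     answer = 0
--     tree={}
--     for i in tangerine:
--         if tree.get(i) is None:
--             tree[i]=0
--         tree[i]+=1
--
--
--     for value in tree.values():
--
--         heap.put(-value)
--     count=0
--     while not heap.empty() and k>0:
--         count+=1
--         k+=heap.get()
--
--     answer=count
--
--     return answer
-- ===== SOURCE B (Python) =====
-- def solution(k, tangerine):
--     tree = {}
--     for i in tangerine: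
--         tree[i] = tree.get(i, 0) + 1
--     groups = 0
--     for c in sorted(tree.values(), reverse=True):
--         if k <= 0:
--             break
--         k -= c
--         groups += 1
--     return groups
-- ===== Notes on version B (the rewrite author's own statement) =====
-- stated objective: faster
-- what changed: Replaces the lazy PriorityQueue (one locking heap-push per distinct value, one heap-pop per group) by an eager sorted(values, reverse=True) followed by a single prefix scan that subtracts each count from k.
import Mathlib
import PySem

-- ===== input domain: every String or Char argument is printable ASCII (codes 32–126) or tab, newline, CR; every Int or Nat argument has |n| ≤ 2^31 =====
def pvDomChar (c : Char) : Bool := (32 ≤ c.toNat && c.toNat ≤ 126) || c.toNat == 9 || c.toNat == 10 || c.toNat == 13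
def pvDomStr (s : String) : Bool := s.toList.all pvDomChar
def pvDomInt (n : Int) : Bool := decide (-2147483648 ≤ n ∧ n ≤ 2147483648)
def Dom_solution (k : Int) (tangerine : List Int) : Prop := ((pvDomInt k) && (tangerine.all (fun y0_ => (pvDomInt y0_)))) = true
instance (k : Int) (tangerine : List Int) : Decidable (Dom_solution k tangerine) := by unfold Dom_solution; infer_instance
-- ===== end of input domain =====

-- B replaces A's PriorityQueue of negated counts by sorting the counts descending once
-- and scanning the prefix; return values proved equal on all inputs.

-- ===== PORT A =====
-- the while-loop: PriorityQueue of ints modelled as a multiset (list); get = remove the minimum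
def solA_loop (heap : List Int) (k : Int) (count : Int) : Int :=
  if heap = [] ∨ k ≤ 0 then count
  else
    match hm : PySem.List.min? heap (fun x => x) with
    | none => count
    | some m => solA_loop (heap.erase m) (k + m) (count + 1)
termination_by heap.length
decreasing_by
  have hmem := PySem.List.min?_mem hm
  have := List.length_erase_of_mem hmem
  have : 0 < heap.length := List.length_pos_of_mem hmem
  omega

def solution (k : Int) (tangerine : List Int) : Int :=
  let tree := tangerine.foldl (fun d i =>
    let d := if (d.get? i).isNone then d.insert i 0 else d
    d.insert i (d.getD i 0 + 1)) (PySem.Dict.empty : PySem.Dict Int Int)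
  let heap := tree.values.foldl (fun h v => h ++ [-v]) ([] : List Int)
  let count := solA_loop heap k 0
  count

-- ===== PORT B =====
def solB_loop (counts : List Int) (k : Int) (groups : Int) : Int :=
  match counts with
  | [] => groups
  | c :: rest => if k ≤ 0 then groups else solB_loop rest (k - c) (groups + 1)

def solution_alt (k : Int) (tangerine : List Int) : Int :=
  let tree := tangerine.foldl (fun d i => d.insert i (d.getD i 0 + 1)) (PySem.Dict.empty : PySem.Dict Int Int)
  solB_loop (PySem.List.sorted tree.values (fun x => x) true) k 0

-- ===== PRECONDITION & SPEC =====
def Spec_solution (k : Int) (tangerine : List Int) (out : Int) : Prop := out = solution_alt k tangerine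
instance (k : Int) (tangerine : List Int) (out : Int) : Decidable (Spec_solution k tangerine out) := by unfold Spec_solution; infer_instance

-- ===== CLAIM (what is proved, stated in full; the proofs are below) =====
def Claim_equal_solution : Prop := ∀ (k : Int) (tangerine : List Int), Dom_solution k tangerine → Spec_solution k tangerine (solution k tangerine)

-- ===== LEMMAS AND PROOFS =====

-- the two counting folds build the same dict
theorem tree_eq (tangerine : List Int) :
    tangerine.foldl (fun d i =>
      let d := if (d.get? i).isNone then d.insert i 0 else d
      d.insert i (d.getD i 0 + 1)) (PySem.Dict.empty : PySem.Dict Int Int)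
    = tangerine.foldl (fun d i => d.insert i (d.getD i 0 + 1)) (PySem.Dict.empty : PySem.Dict Int Int) := by
  apply PySem.List.foldl_congr_mem
  intro d i _
  by_cases h : (d.get? i).isNone
  · have hgd : d.getD i 0 = 0 :=
      PySem.Dict.getD_of_get?_eq_none d 0 (Option.isNone_iff_eq_none.mp h)
    simp [h, hgd, PySem.Dict.insert_insert_self, PySem.Dict.getD_insert_self]
  · simp [h]

-- min-extraction loop = scan of the ascending sort, negated
theorem loopAB (h : List Int) (k g : Int) :
    solA_loop h k g
      = solB_loop ((PySem.List.sorted h (fun x => x) false).map (fun v => -v)) k g := by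
  induction hn : h.length using Nat.strong_induction_on generalizing h k g with
  | _ n ih =>
  by_cases hnil : h = []
  · subst hnil
    rw [solA_loop]
    simp [(PySem.List.sorted_eq_nil_iff ([] : List Int) (fun x => x) false).mpr rfl, solB_loop]
  · obtain ⟨m', t, hs⟩ : ∃ m' t, PySem.List.sorted h (fun x => x) false = m' :: t := by
      cases hso : PySem.List.sorted h (fun x => x) false with
      | nil => exact absurd ((PySem.List.sorted_eq_nil_iff h (fun x => x) false).mp hso) hnil
      | cons a b => exact ⟨a, b, rfl⟩
    by_cases hk : k ≤ 0
    · rw [solA_loop, if_pos (Or.inr hk), hs]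
      simp [solB_loop, hk]
    · -- k > 0, heap nonempty: one step on each side
      obtain ⟨m, hm⟩ : ∃ m, PySem.List.min? h (fun x => x) = some m := by
        cases hmo : PySem.List.min? h (fun x => x) with
        | none => exact absurd ((PySem.List.min?_eq_none_iff h (fun x => x)).mp hmo) hnil
        | some m => exact ⟨m, rfl⟩
      have hmem : m ∈ h := PySem.List.min?_mem hm
      have hm'h : m' ∈ h := by
        refine (PySem.List.mem_sorted h (fun x => x) false m').mp ?_
        rw [hs]; exact List.mem_cons_self
      have hmm' : m = m' := le_antisymm
        (PySem.List.min?_isMin hm m' hm'h)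
        (PySem.List.key_head_sorted_le h (fun x => x) hs m hmem)
      have hperm : (h.erase m).Perm t := by
        have h1 : h.Perm (m' :: t) := by
          rw [← hs]; exact (PySem.List.sorted_perm h (fun x => x) false).symm
        have h2 := h1.erase m'
        rw [List.erase_cons_head] at h2
        rw [hmm']; exact h2
      have hpt : t.Pairwise (fun a b => a ≤ b) := by
        have := PySem.List.sorted_pairwise h (fun x => x)
        rw [hs] at this
        exact this.of_cons
      have hse : PySem.List.sorted (h.erase m) (fun x => x) false = t :=
        PySem.List.sorted_id_eq_of_perm_of_pairwise (h.erase m) t hperm.symm hpt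
      have hlen : (h.erase m).length < n := by
        have := List.length_erase_of_mem hmem
        have := List.length_pos_of_mem hmem
        omega
      rw [solA_loop, if_neg (by exact not_or.mpr ⟨hnil, by omega⟩), hm, hs]
      simp only [List.map_cons, solB_loop, if_neg hk]
      rw [ih _ hlen _ _ _ rfl, hse]
      congr 1
      omega

-- descending sort = negation of the ascending sort of the negations
theorem sorted_neg (vs : List Int) :
    (PySem.List.sorted (vs.map (fun v => -v)) (fun x => x) false).map (fun v => -v)
      = PySem.List.sorted vs (fun x => x) true := by
  apply PySem.List.eq_of_perm_of_pairwise_le_of_injective (key := fun x => -x)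
    (fun a b hab => by simpa using hab)
  · have h1 : (PySem.List.sorted (vs.map (fun v => -v)) (fun x => x) false).Perm
        (vs.map (fun v => -v)) := PySem.List.sorted_perm _ _ _
    have h2 := h1.map (fun v => -v)
    refine h2.trans ?_ |>.trans (PySem.List.sorted_perm vs (fun x => x) true).symm
    simp [List.map_map]
  · rw [List.pairwise_map]
    have := PySem.List.sorted_pairwise (vs.map (fun v => -v)) (fun x => x)
    exact this.imp (by intro a b hab; simpa using hab)
  · have := PySem.List.sorted_pairwise_rev vs (fun x => x)
    exact this.imp (by intro a b hab; simpa using hab)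

-- ===== VERDICT (by name: the statement is the Claim_ definition above) =====
theorem solution_spec : Claim_equal_solution := by
  intro k tangerine _
  unfold Spec_solution solution solution_alt
  simp only [tree_eq, PySem.List.foldl_append_singleton_eq_map, List.nil_append, loopAB,
    sorted_neg]
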